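-- pv_equiv track=rewrite | github.com/lixuanfu66/3DSceneTokenizer | src/threedvae/octree/tree.py | _child_indices
-- ===== SOURCE A (Python) =====
-- def _child_indices(split_flag: int) -> list[int]:
--     active_axes = [axis for axis in range(3) if split_flag & (1 << axis)]
--     child_indices: list[int] = []
--     for local_index in range(1 << len(active_axes)):
--         child_index = 0
--         for bit_position, axis in enumerate(active_axes):
--             if local_index & (1 << bit_position):
--                 child_index |= 1 << axis
--         child_indices.append(child_index)
--     return child_indices
-- ===== SOURCE B (Python) =====
-- def _child_indices(split_flag: int) -> list[int]:
--     return [i for i in range(8) if i & split_flag == i]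
-- ===== Notes on version B (the rewrite author's own statement) =====
-- stated objective: simpler
-- what changed: Instead of collecting active axes and spreading each local index's bits over them with a nested loop, B filters the fixed candidate range 0..7 keeping exactly the submasks of split_flag (i & split_flag == i), which yields the same list in the same increasing order.
import Mathlib
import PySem

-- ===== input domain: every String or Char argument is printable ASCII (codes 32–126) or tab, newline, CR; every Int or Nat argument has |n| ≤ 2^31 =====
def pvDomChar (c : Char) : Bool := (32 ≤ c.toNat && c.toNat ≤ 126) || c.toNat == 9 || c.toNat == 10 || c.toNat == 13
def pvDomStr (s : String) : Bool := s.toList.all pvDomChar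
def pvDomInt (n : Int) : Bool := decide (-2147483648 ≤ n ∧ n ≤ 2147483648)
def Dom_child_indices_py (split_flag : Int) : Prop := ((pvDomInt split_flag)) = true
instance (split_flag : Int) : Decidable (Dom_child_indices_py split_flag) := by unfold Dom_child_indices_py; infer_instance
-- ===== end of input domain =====

-- B replaces A's active-axes construction and nested bit-spreading by a direct filter of the
-- candidate range 0..7 for submasks of split_flag (simpler; same output, same order).

-- ===== PORT A =====
-- Shift amounts '1 << axis' / '1 << bit_position' use '.toNat' on values that are provably
-- nonnegative (axis ∈ range(3), bit_position ∈ enumerate positions from 0), so it is exact there.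
-- active_axes = [axis for axis in range(3) if split_flag & (1 << axis)]
def pvActiveAxes (split_flag : Int) : List Int :=
  (PySem.List.pyRange 0 3 1).filter
    (fun axis => PySem.Int.band split_flag ((1 : Int) <<< axis.toNat) != 0)

def child_indices_py (split_flag : Int) : List Int :=
  let active_axes : List Int := pvActiveAxes split_flag
  -- for local_index in range(1 << len(active_axes)): build child_index bit by bit, append
  (PySem.List.pyRange 0 ((1 : Int) <<< active_axes.length) 1).foldl
    (fun acc local_index =>
      let child_index : Int :=
        (PySem.List.enumerate active_axes 0).foldl
          (fun ci p =>
            if PySem.Int.band local_index ((1 : Int) <<< p.1.toNat) != 0 then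
              PySem.Int.bor ci ((1 : Int) <<< p.2.toNat)
            else ci) 0
      acc ++ [child_index]) []

-- ===== PORT B =====
def child_indices_py_alt (split_flag : Int) : List Int :=
  (PySem.List.pyRange 0 8 1).filter (fun i => PySem.Int.band i split_flag == i)

-- ===== PRECONDITION & SPEC =====
def Spec_child_indices_py (split_flag : Int) (out : List Int) : Prop := out = child_indices_py_alt split_flag
instance (split_flag : Int) (out : List Int) : Decidable (Spec_child_indices_py split_flag out) := by unfold Spec_child_indices_py; infer_instance

-- ===== CLAIM (what is proved, stated in full; the proofs are below) =====
def Claim_equal_child_indices_py : Prop := ∀ (split_flag : Int), Dom_child_indices_py split_flag → Spec_child_indices_py split_flag (child_indices_py split_flag)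

-- ===== LEMMAS AND PROOFS =====

-- For a mask below 8, AND-ing with s only reads s's low three bits, so s may be replaced by s % 8.
theorem nat_and_mod8 (mn n : Nat) (h : mn < 8) : mn &&& n = mn &&& (n % 8) := by
  rw [show n % 8 = n &&& 7 by rw [show (7:Nat) = 2^3-1 by norm_num, Nat.and_two_pow_sub_one_eq_mod],
      ← Nat.land_assoc]
  have h2 : mn &&& n < 8 := lt_of_le_of_lt (Nat.and_le_left) h
  rw [show (7:Nat) = 2^3-1 by norm_num, Nat.and_two_pow_sub_one_eq_mod, Nat.mod_eq_of_lt h2]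

theorem band_mod8 (m s : Int) (h0 : 0 ≤ m) (h8 : m < 8) :
    PySem.Int.band m s = PySem.Int.band m (PySem.Int.mod s 8) := by
  rw [PySem.Int.mod_eq_emod_of_pos (by norm_num : (0:Int) < 8)]
  rcases (by omega : 0 ≤ s ∨ s < 0) with hs | hs
  · have hemod : s % 8 = ((s.toNat % 8 : Nat) : Int) := by omega
    rw [hemod, show s = ((s.toNat : Nat) : Int) by omega, show m = ((m.toNat : Nat) : Int) by omega]
    simp only [PySem.Int.band_natCast, Int.toNat_natCast]
    rw [← nat_and_mod8 _ _ (by omega)]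
  · have hm : PySem.Int.band m s = ((m.toNat - (m.toNat &&& (-s-1).toNat) : Nat) : Int) := by
      simp [PySem.Int.band, h0, not_le.mpr hs]
    have hr0 : (0:Int) ≤ s % 8 := Int.emod_nonneg s (by norm_num)
    have hr8 : s % 8 < 8 := Int.emod_lt_of_pos s (by norm_num)
    have hb : PySem.Int.band m (s % 8) = ((m.toNat &&& (s % 8).toNat : Nat) : Int) := by
      rw [show s % 8 = (((s % 8).toNat : Nat) : Int) by omega, show m = ((m.toNat : Nat) : Int) by omega]
      simp only [PySem.Int.band_natCast, Int.toNat_natCast]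
    rw [hm, hb]
    set p := (-s-1).toNat with hp
    have hk : (s % 8).toNat = 7 - p % 8 := by omega
    rw [hk, nat_and_mod8 m.toNat p (by omega)]
    have hmn : m.toNat < 8 := by omega
    have hk8 : p % 8 < 8 := by omega
    set mn := m.toNat
    set k := p % 8
    congr 1
    interval_cases mn <;> interval_cases k <;> decide

theorem band_flag (s m : Int) (h0 : 0 ≤ m) (h8 : m < 8) :
    PySem.Int.band s m = PySem.Int.band (PySem.Int.mod s 8) m := by
  rw [PySem.Int.band_comm, band_mod8 m s h0 h8, PySem.Int.band_comm]

theorem A_mod (s : Int) : child_indices_py s = child_indices_py (PySem.Int.mod s 8) := by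
  simp only [child_indices_py]
  have h : pvActiveAxes s = pvActiveAxes (PySem.Int.mod s 8) := by
    simp only [pvActiveAxes]
    apply List.filter_congr
    intro axis hax
    obtain ⟨ha1, ha2⟩ := (PySem.List.mem_pyRange_one).1 hax
    interval_cases axis
    · rw [show ((1:Int) <<< (0:Int).toNat) = 1 from rfl, band_flag s 1 (by norm_num) (by norm_num)]
    · rw [show ((1:Int) <<< (1:Int).toNat) = 2 from rfl, band_flag s 2 (by norm_num) (by norm_num)]
    · rw [show ((1:Int) <<< (2:Int).toNat) = 4 from rfl, band_flag s 4 (by norm_num) (by norm_num)]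
  rw [h]

theorem B_mod (s : Int) : child_indices_py_alt s = child_indices_py_alt (PySem.Int.mod s 8) := by
  simp only [child_indices_py_alt]
  apply List.filter_congr
  intro i hi
  obtain ⟨hi1, hi2⟩ := (PySem.List.mem_pyRange_one).1 hi
  rw [band_mod8 i s (by omega) (by omega)]

-- ===== VERDICT (by name: the statement is the Claim_ definition above) =====
theorem child_indices_py_spec : Claim_equal_child_indices_py := by
  intro s _
  unfold Spec_child_indices_py
  rw [A_mod s, B_mod s]
  have h0 : 0 ≤ PySem.Int.mod s 8 := PySem.Int.mod_nonneg s (by norm_num)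
  have h8 : PySem.Int.mod s 8 < 8 := PySem.Int.mod_lt s (by norm_num)
  set t := PySem.Int.mod s 8
  interval_cases t <;> decide
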